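-- pv_equiv track=rewrite | github.com/theguyoverthere/CMU15-112-Spring17 | src/Week2/Homework/nearestKaprekarNumber.py | findRightKaprekar
-- ===== SOURCE A (Python) =====
-- def digitCount(n):
--     if n == 0: return 1
--     count = 0
--     n = abs(n)
--
--     while n > 0:
--         count += 1
--         n //= 10
--     return count
--
-- def sumPartition(n, partitionSize):
--     lPart = 0
--     rPart = 0
--     m = n
--
--     for i in range(partitionSize):
--         nthDigit = m % 10
--         rPart += nthDigit * (10 ** i)
--         m //= 10
--
--     if rPart == 0: return -1
--     lPart = (n - rPart) // (10 ** partitionSize)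
--     return lPart + rPart
--
-- def isKaprekarNumber(n):
--     square    = n ** 2
--     numDigits = digitCount(square)
--
--     for i in range(numDigits):
--         if sumPartition(square, i + 1) == n: return True
--
--     return False
--
-- def findRightKaprekar(lowerBound, upperBound):
--     guess = lowerBound
--
--     if upperBound == 0:
--         while True:
--             guess += 1
--             if isKaprekarNumber(guess): break
--     else:
--         while guess < upperBound:
--             guess += 1
--             if isKaprekarNumber(guess): break
--
--     return guess, (guess - lowerBound)
-- ===== SOURCE B (Python) =====
-- def _isKaprekar(n):
--     # one O(d) pass: incrementally grow the split point p = 10^i and test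
--     # sq // p + sq % p == n, skipping splits whose right part is zero.
--     sq = n * n
--     p = 1
--     while p <= sq:
--         p *= 10
--         r = sq % p
--         if r and sq // p + r == n:
--             return True
--     return False
--
-- def findRightKaprekar(lowerBound, upperBound):
--     if upperBound == 0:
--         guess = lowerBound + 1
--         while not _isKaprekar(guess):
--             guess += 1
--     else:
--         if lowerBound >= upperBound:
--             return lowerBound, 0
--         guess = lowerBound + 1
--         while guess < upperBound and not _isKaprekar(guess):
--             guess += 1
--     return guess, guess - lowerBound
-- ===== Notes on version B (the rewrite author's own statement) =====
-- stated objective: faster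
-- what changed: B replaces A's per-candidate digitCount + per-split digit-by-digit reconstruction of the right part (O(d^2) work per candidate n^2 with d digits) by a single incremental pass that grows the split point p by *10 and tests sq//p + sq%p == n directly (O(d) per candidate), and streamlines the outer search loop.
import Mathlib
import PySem

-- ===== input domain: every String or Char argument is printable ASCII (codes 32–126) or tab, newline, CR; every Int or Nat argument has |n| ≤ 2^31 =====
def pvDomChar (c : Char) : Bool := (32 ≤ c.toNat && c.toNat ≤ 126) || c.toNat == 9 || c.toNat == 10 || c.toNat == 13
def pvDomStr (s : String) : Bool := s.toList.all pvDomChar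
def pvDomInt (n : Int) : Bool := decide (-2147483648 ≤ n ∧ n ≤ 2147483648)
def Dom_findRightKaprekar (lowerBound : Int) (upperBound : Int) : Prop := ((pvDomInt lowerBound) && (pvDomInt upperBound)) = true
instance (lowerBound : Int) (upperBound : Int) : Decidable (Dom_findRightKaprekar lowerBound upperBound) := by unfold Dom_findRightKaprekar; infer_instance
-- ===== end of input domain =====

-- B replaces A's per-split digit reconstruction (digitCount + sumPartition, O(d^2) per
-- candidate) by one incremental modulus pass over the splits of n^2 (O(d) per candidate);
-- the search loops are ported with a fuel counter as a totality device only.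

-- ===== PORT A =====
-- while n > 0: count += 1; n //= 10   (fuel only makes the loop total; it never runs out)
def digitCountLoop : Nat → Int → Int → Int
  | 0, _, count => count
  | f + 1, n, count =>
      if 0 < n then digitCountLoop f (PySem.Int.floordiv n 10) (count + 1) else count

def digitCount (n : Int) : Int :=
  if n = 0 then 1 else digitCountLoop (n.natAbs + 1) |n| 0

-- loop body of sumPartition: state (rPart, m)
def sumPartitionStep (st : Int × Int) (i : Int) : Int × Int :=
  (st.1 + PySem.Int.mod st.2 10 * 10 ^ i.toNat, PySem.Int.floordiv st.2 10)

def sumPartition (n : Int) (partitionSize : Int) : Int :=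
  let st := (PySem.List.pyRange 0 partitionSize 1).foldl sumPartitionStep (0, n)
  if st.1 = 0 then -1
  else PySem.Int.floordiv (n - st.1) (10 ^ partitionSize.toNat) + st.1

def isKaprekarNumber (n : Int) : Bool :=
  (PySem.List.pyRange 0 (digitCount (n ^ 2)) 1).any
    (fun i => sumPartition (n ^ 2) (i + 1) == n)

-- while True: guess += 1; if isKaprekarNumber(guess): break   (fuel = totality device)
def loopA : Nat → Int → Int
  | 0, guess => guess
  | f + 1, guess =>
      let g := guess + 1
      if isKaprekarNumber g then g else loopA f g

-- while guess < upperBound: guess += 1; if isKaprekarNumber(guess): break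
def loopBoundedA (guess : Int) (upperBound : Int) : Int :=
  if h : guess < upperBound then
    let g := guess + 1
    if isKaprekarNumber g then g else loopBoundedA g upperBound
  else guess
termination_by (upperBound - guess).toNat
decreasing_by omega

def findRightKaprekar (lowerBound : Int) (upperBound : Int) : List Int :=
  let guess :=
    if upperBound = 0 then loopA (10 * lowerBound.natAbs + 100) lowerBound
    else loopBoundedA lowerBound upperBound
  [guess, guess - lowerBound]

-- ===== PORT B =====
-- while p <= sq: p *= 10; r = sq % p; if r and sq // p + r == n: return True
-- (fuel = totality device; p exceeds sq after at most sq.toNat + 1 doublings-by-10)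
def isKapLoopB (n : Int) (sq : Int) : Int → Nat → Bool
  | _, 0 => false
  | p, f + 1 =>
      if p ≤ sq then
        let p' := p * 10
        let r := PySem.Int.mod sq p'
        if r != 0 && (PySem.Int.floordiv sq p' + r == n) then true
        else isKapLoopB n sq p' f
      else false

def isKaprekarB (n : Int) : Bool :=
  isKapLoopB n (n * n) 1 ((n * n).toNat + 1)

-- while not _isKaprekar(guess): guess += 1   (fuel = totality device)
def loopB : Nat → Int → Int
  | 0, guess => guess
  | f + 1, guess => if isKaprekarB guess then guess else loopB f (guess + 1)

-- while guess < upperBound and not _isKaprekar(guess): guess += 1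
def loopBoundedB (guess : Int) (upperBound : Int) : Int :=
  if h : guess < upperBound ∧ isKaprekarB guess = false then
    loopBoundedB (guess + 1) upperBound
  else guess
termination_by (upperBound - guess).toNat
decreasing_by omega

def findRightKaprekar_alt (lowerBound : Int) (upperBound : Int) : List Int :=
  if upperBound = 0 then
    let g := loopB (10 * lowerBound.natAbs + 99) (lowerBound + 1)
    [g, g - lowerBound]
  else if lowerBound ≥ upperBound then [lowerBound, 0]
  else
    let g := loopBoundedB (lowerBound + 1) upperBound
    [g, g - lowerBound]

-- ===== PRECONDITION & SPEC =====
def Spec_findRightKaprekar (lowerBound : Int) (upperBound : Int) (out : List Int) : Prop := out = findRightKaprekar_alt lowerBound upperBound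
instance (lowerBound : Int) (upperBound : Int) (out : List Int) : Decidable (Spec_findRightKaprekar lowerBound upperBound out) := by unfold Spec_findRightKaprekar; infer_instance

-- ===== CLAIM (what is proved, stated in full; the proofs are below) =====
def Claim_equal_findRightKaprekar : Prop := ∀ (lowerBound : Int) (upperBound : Int), Dom_findRightKaprekar lowerBound upperBound → Spec_findRightKaprekar lowerBound upperBound (findRightKaprekar lowerBound upperBound)

-- ===== LEMMAS AND PROOFS =====

-- the common split test: does the split of sq before the last (i+1) digits hit n?
def splitHit (n sq : Int) (i : Int) : Bool :=
  (PySem.Int.mod sq (10 ^ (i.toNat + 1)) != 0) &&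
  (PySem.Int.floordiv sq (10 ^ (i.toNat + 1)) + PySem.Int.mod sq (10 ^ (i.toNat + 1)) == n)

lemma ediv_pow_succ (s : Int) (k : Nat) : s / 10 ^ (k + 1) = s / 10 ^ k / 10 := by
  rw [pow_succ]
  exact (Int.ediv_ediv_of_nonneg (by positivity)).symm

lemma emod_pow_succ (s : Int) (k : Nat) :
    s % 10 ^ (k + 1) = s % 10 ^ k + s / 10 ^ k % 10 * 10 ^ k := by
  rw [Int.emod_def, Int.emod_def, Int.emod_def, ediv_pow_succ, pow_succ]
  ring

lemma fold_digits (s : Int) (k : Nat) :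
    (PySem.List.pyRange 0 (k : Int) 1).foldl sumPartitionStep (0, s)
      = (s % 10 ^ k, s / 10 ^ k) := by
  induction k with
  | zero => simp [PySem.List.pyRange_one_eq_nil]
  | succ k ih =>
      have hc : ((k + 1 : Nat) : Int) = (k : Int) + 1 := by push_cast; ring
      rw [hc, PySem.List.pyRange_one_succ_right (by positivity), List.foldl_append, ih]
      simp only [List.foldl_cons, List.foldl_nil, sumPartitionStep,
        PySem.Int.mod_eq_emod_of_pos (by norm_num : (0:Int) < 10),
        PySem.Int.floordiv_eq_ediv_of_pos (by norm_num : (0:Int) < 10), Int.toNat_natCast]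
      rw [emod_pow_succ, ediv_pow_succ]

lemma sumPartition_eq (s : Int) (k : Nat) :
    sumPartition s (k : Int)
      = if s % 10 ^ k = 0 then -1 else s / 10 ^ k + s % 10 ^ k := by
  have hp : (0:Int) < 10 ^ k := by positivity
  unfold sumPartition
  rw [fold_digits]
  by_cases h : s % 10 ^ k = 0
  · simp [h]
  · have hl : (s - s % 10 ^ k) / 10 ^ k = s / 10 ^ k := by
      have : s - s % 10 ^ k = 10 ^ k * (s / 10 ^ k) := by
        rw [Int.emod_def]; ring
      rw [this, Int.mul_ediv_cancel_left _ (ne_of_gt hp)]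
    simp only [h, if_false, Int.toNat_natCast,
      PySem.Int.floordiv_eq_ediv_of_pos hp, hl]

lemma digitCountLoop_zero (f : Nat) (c : Int) : digitCountLoop f 0 c = c := by
  cases f <;> simp [digitCountLoop]

lemma digitCountLoop_spec (f : Nat) :
    ∀ n c : Int, 0 < n → n < 10 ^ f →
    ∃ d : Nat, digitCountLoop f n c = c + d ∧ 1 ≤ d ∧ 10 ^ (d - 1) ≤ n ∧ n < 10 ^ d := by
  induction f with
  | zero => intro n c hn hf; simp at hf; omega
  | succ f ih =>
      intro n c hn hf
      have hstep : digitCountLoop (f + 1) n c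
          = digitCountLoop f (PySem.Int.floordiv n 10) (c + 1) := by
        simp [digitCountLoop, hn]
      rw [PySem.Int.floordiv_eq_ediv_of_pos (by norm_num : (0:Int) < 10)] at hstep
      by_cases hsmall : n < 10
      · have h0 : n / 10 = 0 := Int.ediv_eq_zero_of_lt (le_of_lt hn) hsmall
        refine ⟨1, ?_, le_refl 1, by simpa using hn, by simpa using hsmall⟩
        rw [hstep, h0, digitCountLoop_zero]; norm_num
      · push_neg at hsmall
        have hpos : 0 < n / 10 := by
          have : (1:Int) ≤ n / 10 := by
            rw [Int.le_ediv_iff_mul_le (by norm_num : (0:Int) < 10)]; omega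
          omega
        have hlt : n / 10 < 10 ^ f := by
          rw [Int.ediv_lt_iff_lt_mul (by norm_num : (0:Int) < 10)]
          calc n < 10 ^ (f + 1) := hf
            _ = 10 ^ f * 10 := by rw [pow_succ]
        obtain ⟨d, hdc, hd1, hlb, hub⟩ := ih (n / 10) (c + 1) hpos hlt
        have hmul : n / 10 * 10 ≤ n := by
          have h1 := Int.emod_nonneg n (by norm_num : (10:Int) ≠ 0)
          have h2 := Int.emod_def n 10
          omega
        have hub' : n < 10 * (n / 10) + 10 := by
          have h2 := Int.emod_def n 10
          have h3 := Int.emod_lt_of_pos n (by norm_num : (0:Int) < 10)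
          omega
        refine ⟨d + 1, ?_, by omega, ?_, ?_⟩
        · rw [hstep, hdc]; push_cast; ring
        · have he : d - 1 + 1 = d := by omega
          have h6 : (10:Int) ^ (d - 1) * 10 ≤ n / 10 * 10 := by nlinarith
          have h5 : (10:Int) ^ (d - 1) * 10 = 10 ^ d := by rw [← pow_succ, he]
          have h4 : (10:Int) ^ d ≤ n := by linarith
          simpa using h4
        · calc n < 10 * (n / 10) + 10 := hub'
            _ ≤ 10 * (10 ^ d - 1) + 10 := by omega
            _ = 10 ^ (d + 1) := by rw [pow_succ]; ring
  
lemma digitCount_spec (s : Int) (hs : 0 < s) :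
    ∃ d : Nat, digitCount s = (d : Int) ∧ 1 ≤ d ∧ 10 ^ (d - 1) ≤ s ∧ s < 10 ^ d := by
  have habs : |s| = s := abs_of_pos hs
  have hcast : ((s.natAbs : Nat) : Int) = s := Int.natAbs_of_nonneg (le_of_lt hs)
  have hfuel : s < 10 ^ (s.natAbs + 1) := by
    have h1 : (s.natAbs : Int) < (10 ^ s.natAbs : Nat) := by
      exact_mod_cast Nat.lt_pow_self (by norm_num) (n := s.natAbs)
    have h2 : ((10 ^ s.natAbs : Nat) : Int) = 10 ^ s.natAbs := by push_cast; ring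
    have h3 : (10:Int) ^ s.natAbs ≤ 10 ^ (s.natAbs + 1) := by
      apply pow_le_pow_right₀ (by norm_num) (by omega)
    omega
  obtain ⟨d, hdc, h1, h2, h3⟩ := digitCountLoop_spec (s.natAbs + 1) s 0 hs hfuel
  refine ⟨d, ?_, h1, h2, h3⟩
  rw [digitCount, if_neg (ne_of_gt hs), habs, hdc]
  ring

lemma any_congr' {a : Type} (l : List a) (f g : a → Bool)
    (h : ∀ x ∈ l, f x = g x) : l.any f = l.any g := by
  induction l with
  | nil => rfl
  | cons x t ih =>
      simp only [List.any_cons, h x (by simp), ih fun y hy => h y (by simp [hy])]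

lemma kapA_eq_any (n : Int) (hn1 : n ≠ -1) (d : Nat)
    (hd : digitCount (n ^ 2) = (d : Int)) :
    isKaprekarNumber n = (PySem.List.pyRange 0 (d : Int) 1).any (splitHit n (n ^ 2)) := by
  unfold isKaprekarNumber
  rw [hd]

  apply any_congr'
  intro i hi
  have hi0 : 0 ≤ i := (PySem.List.mem_pyRange_one.mp hi).1
  have hc : i + 1 = ((i.toNat + 1 : Nat) : Int) := by
    push_cast [Int.toNat_of_nonneg hi0]; ring
  rw [hc, sumPartition_eq (n ^ 2) (i.toNat + 1)]
  have hp : (0:Int) < 10 ^ (i.toNat + 1) := by positivity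
  unfold splitHit
  rw [PySem.Int.mod_eq_emod_of_pos hp, PySem.Int.floordiv_eq_ediv_of_pos hp]
  by_cases h : n ^ 2 % 10 ^ (i.toNat + 1) = 0
  · simp only [h, if_true]
    have : ((-1 : Int) == n) = false := by
      simp only [beq_eq_false_iff_ne, ne_eq]
      intro he; exact hn1 he.symm
    simp [this]
  · simp [h]

lemma kapB_eq_any (n sq : Int) (d : Nat)
    (hd1 : 10 ^ (d - 1) ≤ sq) (hd2 : sq < 10 ^ d) :
    ∀ (f k : Nat), sq < 10 ^ (k + f) →
      isKapLoopB n sq (10 ^ k) f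
        = (PySem.List.pyRange (k : Int) (d : Int) 1).any (splitHit n sq) := by
  intro f
  induction f with
  | zero =>
      intro k hk
      have hdk : (d : Int) ≤ (k : Int) := by
        have : (10:Int) ^ (d - 1) < 10 ^ k := by
          calc (10:Int) ^ (d - 1) ≤ sq := hd1
            _ < 10 ^ (k + 0) := hk
            _ = 10 ^ k := by rw [Nat.add_zero]
        have := (pow_lt_pow_iff_right₀ (by norm_num : (1:Int) < 10)).mp this
        exact_mod_cast by omega
      rw [PySem.List.pyRange_one_eq_nil hdk]
      simp [isKapLoopB]
  | succ f ih =>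
      intro k hk
      by_cases hle : (10:Int) ^ k ≤ sq
      · have hkd : (k : Int) < (d : Int) := by
          have : (10:Int) ^ k < 10 ^ d := lt_of_le_of_lt hle hd2
          have := (pow_lt_pow_iff_right₀ (by norm_num : (1:Int) < 10)).mp this
          exact_mod_cast this
        rw [PySem.List.pyRange_one_cons hkd, List.any_cons]
        have hsplit : ((PySem.Int.mod sq (10 ^ k * 10) != 0) &&
            (PySem.Int.floordiv sq (10 ^ k * 10) + PySem.Int.mod sq (10 ^ k * 10) == n))
            = splitHit n sq (k : Int) := by
          unfold splitHit
          rw [Int.toNat_natCast, pow_succ]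
        have hstep : isKapLoopB n sq (10 ^ k) (f + 1)
            = (if (PySem.Int.mod sq (10 ^ k * 10) != 0) &&
                  (PySem.Int.floordiv sq (10 ^ k * 10) + PySem.Int.mod sq (10 ^ k * 10) == n)
               then true
               else isKapLoopB n sq (10 ^ k * 10) f) := by
          simp only [isKapLoopB, hle, if_true]
        rw [hstep, hsplit]
        by_cases hhit : splitHit n sq (k : Int) = true
        · simp [hhit]
        · have hhf : splitHit n sq (k : Int) = false := by simpa using hhit
          have hrec : (10:Int) ^ k * 10 = 10 ^ (k + 1) := by rw [pow_succ]
          have hk' : sq < 10 ^ (k + 1 + f) := by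
            have : k + 1 + f = k + (f + 1) := by omega
            rw [this]; exact hk
          have hc : ((k : Int) + 1) = ((k + 1 : Nat) : Int) := by push_cast; ring
          rw [hhf, if_neg (by simp), hrec, ih (k + 1) hk', Bool.false_or, hc]
      · push_neg at hle
        have hdk : (d : Int) ≤ (k : Int) := by
          have : (10:Int) ^ (d - 1) < 10 ^ k := lt_of_le_of_lt hd1 hle
          have := (pow_lt_pow_iff_right₀ (by norm_num : (1:Int) < 10)).mp this
          exact_mod_cast by omega
        rw [PySem.List.pyRange_one_eq_nil hdk]
        simp [isKapLoopB, not_le.mpr hle]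

lemma kap_eq (n : Int) : isKaprekarNumber n = isKaprekarB n := by
  rcases eq_or_ne n 0 with rfl | hn
  · decide
  rcases eq_or_ne n (-1) with rfl | hn1
  · decide
  have hsq : 0 < n ^ 2 := lt_of_le_of_ne (sq_nonneg n) (Ne.symm (pow_ne_zero 2 hn))
  obtain ⟨d, hdc, hd1, hlb, hub⟩ := digitCount_spec (n ^ 2) hsq
  have hmul : n * n = n ^ 2 := by ring
  have hcast : ((n ^ 2).toNat : Int) = n ^ 2 := Int.toNat_of_nonneg (le_of_lt hsq)
  have hfuel : n ^ 2 < 10 ^ (0 + ((n ^ 2).toNat + 1)) := by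
    rw [Nat.zero_add]
    have h1 : (n ^ 2).toNat < 10 ^ (n ^ 2).toNat :=
      Nat.lt_pow_self (by norm_num) (n := (n ^ 2).toNat)
    have h2 : n ^ 2 < (10:Int) ^ (n ^ 2).toNat := by
      calc n ^ 2 = ((n ^ 2).toNat : Int) := hcast.symm
        _ < ((10 ^ (n ^ 2).toNat : Nat) : Int) := by exact_mod_cast h1
        _ = (10:Int) ^ (n ^ 2).toNat := by push_cast; ring
    calc n ^ 2 < (10:Int) ^ (n ^ 2).toNat := h2
      _ ≤ 10 ^ ((n ^ 2).toNat + 1) := by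
          apply pow_le_pow_right₀ (by norm_num) (by omega)
  have hB : isKaprekarB n
      = (PySem.List.pyRange ((0 : Nat) : Int) (d : Int) 1).any (splitHit n (n ^ 2)) := by
    unfold isKaprekarB
    rw [hmul]
    have h1 : (1 : Int) = 10 ^ (0 : Nat) := by norm_num
    rw [h1]
    exact kapB_eq_any n (n ^ 2) d hlb hub ((n ^ 2).toNat + 1) 0 hfuel
  rw [hB, kapA_eq_any n hn1 d hdc]
  norm_num

lemma loopA_eq_loopB (f : Nat) : ∀ g : Int, loopA (f + 1) g = loopB f (g + 1) := by
  induction f with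
  | zero =>
      intro g
      have hA : loopA 1 g = if isKaprekarNumber (g + 1) then g + 1 else loopA 0 (g + 1) := rfl
      rw [hA]
      by_cases h : isKaprekarNumber (g + 1) <;> simp [h, loopA, loopB]
  | succ f ih =>
      intro g
      have hA : loopA (f + 1 + 1) g
          = if isKaprekarNumber (g + 1) then g + 1 else loopA (f + 1) (g + 1) := rfl
      have hB : loopB (f + 1) (g + 1)
          = if isKaprekarB (g + 1) then g + 1 else loopB f (g + 1 + 1) := rfl
      rw [hA, hB, kap_eq]
      by_cases h : isKaprekarB (g + 1)
      · simp [h]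
      · simp only [h, if_false]
        exact ih (g + 1)

lemma loopBoundedA_eq (ub : Int) : ∀ g : Int, g < ub → loopBoundedA g ub = loopBoundedB (g + 1) ub := by
  have H : ∀ m : Nat, ∀ g : Int, (ub - g).toNat = m → g < ub →
      loopBoundedA g ub = loopBoundedB (g + 1) ub := by
    intro m
    induction m using Nat.strong_induction_on with
    | _ m ih =>
      intro g hm hg
      rw [loopBoundedA, dif_pos hg]
      rw [loopBoundedB]
      by_cases hkap : isKaprekarNumber (g + 1)
      · rw [if_pos hkap, dif_neg]
        rw [kap_eq] at hkap
        simp [hkap]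
      · rw [if_neg hkap]
        rw [kap_eq] at hkap
        by_cases hg1 : g + 1 < ub
        · rw [dif_pos ⟨hg1, by simpa using hkap⟩]
          exact ih (ub - (g + 1)).toNat (by omega) (g + 1) rfl hg1
        · rw [dif_neg (by tauto)]
          rw [loopBoundedA, dif_neg hg1]
  intro g hg
  exact H (ub - g).toNat g rfl hg

-- ===== VERDICT (by name: the statement is the Claim_ definition above) =====
theorem findRightKaprekar_spec : Claim_equal_findRightKaprekar := by
  intro lb ub _
  unfold Spec_findRightKaprekar findRightKaprekar findRightKaprekar_alt
  by_cases hub : ub = 0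
  · simp only [hub, if_true, if_pos rfl]
    have hfuel : 10 * lb.natAbs + 100 = (10 * lb.natAbs + 99) + 1 := by omega
    rw [hfuel, loopA_eq_loopB (10 * lb.natAbs + 99) lb]
  · by_cases hlt : lb < ub
    · simp only [hub, if_false, if_neg hub, if_neg (not_le.mpr hlt)]
      rw [loopBoundedA_eq ub lb hlt]
    · have hge : ub ≤ lb := by omega
      have hA : loopBoundedA lb ub = lb := by
        rw [loopBoundedA, dif_neg hlt]
      simp only [hub, if_false, if_neg hub, if_pos (by omega : lb ≥ ub), hA, sub_self]
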